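-- pv_equiv track=rewrite | github.com/Toxich4/CVE_Telegram_Bot | cve_bot.py | pick_english_description
-- ===== SOURCE A (Python) =====
-- from typing import Iterable, List, Dict, Any, Optional, Tuple
--
-- def pick_english_description(cve: Dict[str, Any]) -> Optional[str]:
--     for d in cve.get("descriptions", []):
--         if (d.get("lang") or "").lower() == "en":
--             val = (d.get("value") or "").strip()
--             if val:
--                 return val
--     for d in cve.get("descriptions", []):
--         val = (d.get("value") or "").strip()
--         if val:
--             return val
--     return None
-- ===== SOURCE B (Python) =====
-- def pick_english_description(cve):
--     fallback = None
--     for d in cve.get("descriptions", []):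
--         val = (d.get("value") or "").strip()
--         if not val:
--             continue
--         if (d.get("lang") or "").lower() == "en":
--             return val
--         if fallback is None:
--             fallback = val
--     return fallback
-- ===== Notes on version B (the rewrite author's own statement) =====
-- stated objective: simpler
-- what changed: Replaces A's two sequential passes over the descriptions (English pass, then any-language pass) by a single loop that returns the first non-empty English value immediately while remembering the first non-empty value of any language as a fallback.
import Mathlib
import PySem

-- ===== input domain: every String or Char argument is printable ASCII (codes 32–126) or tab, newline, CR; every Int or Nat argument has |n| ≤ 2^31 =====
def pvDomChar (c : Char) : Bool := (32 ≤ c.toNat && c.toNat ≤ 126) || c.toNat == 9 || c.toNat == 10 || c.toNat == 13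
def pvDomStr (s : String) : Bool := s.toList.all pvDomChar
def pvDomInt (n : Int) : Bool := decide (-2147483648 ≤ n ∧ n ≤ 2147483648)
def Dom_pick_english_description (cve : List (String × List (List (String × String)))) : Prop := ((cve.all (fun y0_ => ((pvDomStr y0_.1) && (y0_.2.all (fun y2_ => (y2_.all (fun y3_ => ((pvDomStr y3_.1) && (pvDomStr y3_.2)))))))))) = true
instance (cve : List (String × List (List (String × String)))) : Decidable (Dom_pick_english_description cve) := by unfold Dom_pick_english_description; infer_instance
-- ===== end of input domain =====

-- ===== PORT A =====
-- One honest line: B folds A's two passes (English-first, then any-language) into a single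
-- loop with a fallback accumulator; same return value, simpler single traversal.

-- first pass of A: first description whose lang lowercases to "en" and whose stripped value is non-empty
def pickA_en : List (List (String × String)) → Option String
  | [] => none
  | d :: rest =>
    if PySem.Str.lower ((PySem.Dict.mk d).getD "lang" "") = "en" then
      let val := PySem.Str.strip ((PySem.Dict.mk d).getD "value" "")
      if val ≠ "" then some val else pickA_en rest
    else pickA_en rest

-- second pass of A: first description with a non-empty stripped value, any language
def pickA_any : List (List (String × String)) → Option String
  | [] => none
  | d :: rest =>
    let val := PySem.Str.strip ((PySem.Dict.mk d).getD "value" "")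
    if val ≠ "" then some val else pickA_any rest

def pick_english_description (cve : List (String × List (List (String × String)))) : Option String :=
  let descs := (PySem.Dict.mk cve).getD "descriptions" []
  match pickA_en descs with
  | some v => some v
  | none =>
    match pickA_any descs with
    | some v => some v
    | none => none

-- ===== PORT B =====
-- B's single loop: early return on English non-empty, first non-empty of any language as fallback
def pickB_loop (fallback : Option String) : List (List (String × String)) → Option String
  | [] => fallback
  | d :: rest =>
    let val := PySem.Str.strip ((PySem.Dict.mk d).getD "value" "")
    if val = "" then pickB_loop fallback rest
    else if PySem.Str.lower ((PySem.Dict.mk d).getD "lang" "") = "en" then some val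
    else pickB_loop (if fallback.isNone then some val else fallback) rest

def pick_english_description_alt (cve : List (String × List (List (String × String)))) : Option String :=
  pickB_loop none ((PySem.Dict.mk cve).getD "descriptions" [])

-- ===== PRECONDITION & SPEC =====
def Spec_pick_english_description (cve : List (String × List (List (String × String)))) (out : Option String) : Prop := out = pick_english_description_alt cve
instance (cve : List (String × List (List (String × String)))) (out : Option String) : Decidable (Spec_pick_english_description cve out) := by unfold Spec_pick_english_description; infer_instance

-- ===== CLAIM (what is proved, stated in full; the proofs are below) =====
def Claim_equal_pick_english_description : Prop := ∀ (cve : List (String × List (List (String × String)))), Dom_pick_english_description cve → Spec_pick_english_description cve (pick_english_description cve)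

-- ===== LEMMAS AND PROOFS =====
-- with a some-fallback, B's loop returns the first English non-empty value, else the fallback
theorem pickB_loop_some (v : String) (ds : List (List (String × String))) :
    pickB_loop (some v) ds = (pickA_en ds).or (some v) := by
  induction ds with
  | nil => simp [pickB_loop, pickA_en]
  | cons d rest ih =>
    simp only [pickB_loop, pickA_en]
    split_ifs with h1 h2 h2 <;> simp_all [Option.or]

-- with no fallback yet, B's loop computes A's English pass or-else A's any-language pass
theorem pickB_loop_none (ds : List (List (String × String))) :
    pickB_loop none ds = (pickA_en ds).or (pickA_any ds) := by
  induction ds with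
  | nil => simp [pickB_loop, pickA_en, pickA_any]
  | cons d rest ih =>
    simp only [pickB_loop, pickA_en, pickA_any]
    split_ifs with h1 h2 h2 <;>
      simp_all [Option.or, pickB_loop_some]

-- ===== VERDICT (by name: the statement is the Claim_ definition above) =====
theorem pick_english_description_spec : Claim_equal_pick_english_description := by
  intro cve _
  unfold Spec_pick_english_description pick_english_description pick_english_description_alt
  rw [pickB_loop_none]
  cases h : pickA_en ((PySem.Dict.mk cve).getD "descriptions" []) <;>
    cases h2 : pickA_any ((PySem.Dict.mk cve).getD "descriptions" []) <;>
    simp [Option.or, h, h2]
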